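-- pv_equiv track=rewrite | github.com/junymd2013-commits/attendance-check | gcd_u_practice_app.py | euclid_steps
-- ===== SOURCE A (Python) =====
-- def euclid_steps(a, b):
--     steps = []
--     while b != 0:
--         q = a // b
--         r = a % b
--         steps.append(f"{a} = {b} × {q} + {r}")
--         a, b = b, r
--     steps.append(f"最大公約数 = {a}")
--     return steps
-- ===== SOURCE B (Python) =====
-- def euclid_steps(a, b):
--     if b == 0:
--         return [f"最大公約数 = {a}"]
--     q, r = divmod(a, b)
--     return [f"{a} = {b} × {q} + {r}"] + euclid_steps(b, r)
-- ===== Notes on version B (the rewrite author's own statement) =====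
-- stated objective: alternative
-- what changed: Replaces the while loop that mutates an accumulator list with structural recursion on the GCD recurrence, building the step list by concatenation down the call stack (divmod gives quotient and remainder in one step).
import Mathlib
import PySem

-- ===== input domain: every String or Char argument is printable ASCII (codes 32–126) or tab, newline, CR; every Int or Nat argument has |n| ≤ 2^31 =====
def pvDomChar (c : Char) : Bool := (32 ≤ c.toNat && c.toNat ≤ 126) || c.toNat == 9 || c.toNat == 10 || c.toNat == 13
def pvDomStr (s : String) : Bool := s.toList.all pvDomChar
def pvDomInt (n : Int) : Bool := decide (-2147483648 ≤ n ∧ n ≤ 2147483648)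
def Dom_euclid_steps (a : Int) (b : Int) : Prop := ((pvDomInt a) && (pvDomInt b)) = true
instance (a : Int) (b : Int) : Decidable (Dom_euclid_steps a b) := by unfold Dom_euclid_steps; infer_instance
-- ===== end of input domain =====

-- B replaces A's accumulator-mutating while loop by structural recursion on the GCD recurrence (same output; alternative decomposition, no speed claim).


-- Python's % takes the sign of the divisor, so |a % b| < |b| whenever b ≠ 0 (termination measure for both ports).
theorem pv_mod_natAbs_lt (a b : Int) (h : b ≠ 0) : (PySem.Int.mod a b).natAbs < b.natAbs := by
  rcases lt_or_gt_of_ne h with hb | hb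
  · have := PySem.Int.mod_neg_bounds a hb
    omega
  · have h1 := PySem.Int.mod_nonneg a hb
    have h2 := PySem.Int.mod_lt a hb
    omega

-- ===== PORT A =====
-- the while loop, carrying the mutable `steps` accumulator as state
def euclidLoopA (a b : Int) (steps : List String) : List String :=
  if hb : b ≠ 0 then
    let q := PySem.Int.floordiv a b
    let r := PySem.Int.mod a b
    euclidLoopA b r
      (steps ++ [PySem.Int.toStr a ++ " = " ++ PySem.Int.toStr b ++ " × " ++
                 PySem.Int.toStr q ++ " + " ++ PySem.Int.toStr r])
  else
    steps ++ ["最大公約数 = " ++ PySem.Int.toStr a]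
termination_by b.natAbs
decreasing_by exact pv_mod_natAbs_lt a b hb

def euclid_steps (a : Int) (b : Int) : List String :=
  euclidLoopA a b []

-- ===== PORT B =====
def euclid_steps_alt (a : Int) (b : Int) : List String :=
  if hb : b = 0 then
    ["最大公約数 = " ++ PySem.Int.toStr a]
  else
    let q := PySem.Int.floordiv a b
    let r := PySem.Int.mod a b
    (PySem.Int.toStr a ++ " = " ++ PySem.Int.toStr b ++ " × " ++
     PySem.Int.toStr q ++ " + " ++ PySem.Int.toStr r) :: euclid_steps_alt b r
termination_by b.natAbs
decreasing_by exact pv_mod_natAbs_lt a b hb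

-- ===== PRECONDITION & SPEC =====
def Spec_euclid_steps (a : Int) (b : Int) (out : List String) : Prop := out = euclid_steps_alt a b
instance (a : Int) (b : Int) (out : List String) : Decidable (Spec_euclid_steps a b out) := by unfold Spec_euclid_steps; infer_instance

-- ===== CLAIM (what is proved, stated in full; the proofs are below) =====
def Claim_equal_euclid_steps : Prop := ∀ (a : Int) (b : Int), Dom_euclid_steps a b → Spec_euclid_steps a b (euclid_steps a b)

-- ===== LEMMAS AND PROOFS =====
-- Loop invariant: A's loop appends exactly B's recursive result after the accumulated prefix.
theorem euclidLoopA_eq (n : Nat) : ∀ (a b : Int) (steps : List String), b.natAbs ≤ n →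
    euclidLoopA a b steps = steps ++ euclid_steps_alt a b := by
  induction n with
  | zero =>
    intro a b steps h
    have hb : b = 0 := by omega
    subst hb
    unfold euclidLoopA euclid_steps_alt
    simp
  | succ n ih =>
    intro a b steps h
    by_cases hb : b = 0
    · subst hb
      unfold euclidLoopA euclid_steps_alt
      simp
    · unfold euclidLoopA euclid_steps_alt
      simp only [hb, dif_neg, dif_pos, ne_eq, not_false_iff, not_true]
      rw [ih b (PySem.Int.mod a b) _ (by have := pv_mod_natAbs_lt a b hb; omega)]
      simp

-- ===== VERDICT (by name: the statement is the Claim_ definition above) =====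
theorem euclid_steps_spec : Claim_equal_euclid_steps := by
  intro a b _
  unfold Spec_euclid_steps euclid_steps
  rw [euclidLoopA_eq b.natAbs a b [] (le_refl _)]
  simp
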